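-- pv_equiv track=rewrite | github.com/Mahamadou-dev/CryptoLab-backend | utils/playfair.py | format_word_to_digrams
-- ===== SOURCE A (Python) =====
-- def format_word_to_digrams(word: str) -> list[str]:
--     """Formate un seul mot en digrammes, gère les doublons et le padding."""
--     word = word.upper().replace("J", "I")
--
--     # 1. Gérer les lettres doubles (CORRIGÉ)
--     #    Ex: "HELLO" -> "HE" + "L" + "X" + "L" + "O"
--     i = 0
--     formatted = ""
--     while i < len(word):
--         char1 = word[i]
--
--         if not char1.isalpha():  # Ignore les non-lettres
--             i += 1
--             continue
--
--         formatted += char1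
--
--         # Trouver le prochain caractère alphabétique
--         j = i + 1
--         while j < len(word) and not word[j].isalpha():
--             j += 1
--
--         if j >= len(word):  # Fin du mot
--             break
--
--         char2 = word[j]
--
--         if char1 == char2:
--             formatted += "X"  # Insère 'X'
--             i = j  # Recommence à partir de la lettre doublon
--         else:
--             formatted += char2
--             i = j + 1  # Passe à la lettre suivante après la paire
--
--     # 2. Ajouter un 'X' si la longueur est impaire
--     if len(formatted) % 2 != 0:
--         formatted += "X"
--
--     # 3. Diviser en digrammes
--     return [formatted[i:i + 2] for i in range(0, len(formatted), 2)]
-- ===== SOURCE B (Python) =====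
-- def format_word_to_digrams(word: str) -> list[str]:
--     clean = [c for c in word.upper().replace("J", "I") if c.isalpha()]
--     digrams = []
--     i = 0
--     n = len(clean)
--     while i < n:
--         a = clean[i]
--         if i + 1 == n or clean[i + 1] == a:
--             digrams.append(a + "X")
--             i += 1
--         else:
--             digrams.append(a + clean[i + 1])
--             i += 2
--     return digrams
-- ===== Notes on version B (the rewrite author's own statement) =====
-- stated objective: faster
-- what changed: B first filters the upper-cased J->I word down to its alphabetic characters, then emits finished two-letter digrams directly in one pairing loop over a list (padding the trailing letter inline), instead of A's interleaved non-alpha skipping with an inner next-alpha index scan that grows a string by repeated +=, a separate odd-length pad step and a final range/slice chunking pass.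
import Mathlib
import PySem

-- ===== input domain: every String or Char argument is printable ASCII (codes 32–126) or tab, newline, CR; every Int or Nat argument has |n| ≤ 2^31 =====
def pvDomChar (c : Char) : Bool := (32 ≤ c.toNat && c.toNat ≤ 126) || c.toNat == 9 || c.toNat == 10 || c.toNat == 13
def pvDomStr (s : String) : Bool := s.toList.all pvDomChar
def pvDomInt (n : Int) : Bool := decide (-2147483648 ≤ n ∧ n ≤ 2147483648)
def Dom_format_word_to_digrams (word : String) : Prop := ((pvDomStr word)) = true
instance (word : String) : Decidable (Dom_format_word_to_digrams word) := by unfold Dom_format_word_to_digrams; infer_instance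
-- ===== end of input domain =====

-- B replaces A's interleaved non-alpha-skipping loop (inner next-alpha index scan, then a pad
-- step and a range/slice chunking pass) by a filter pass followed by one loop that emits the
-- finished digrams directly; same return value on every input, proved below.

-- ===== PORT A =====

-- A's inner while loop: advance j past non-alphabetic characters
def pvNextAlpha (w : List Char) (j : Nat) : Nat :=
  if h : j < w.length then
    if PySem.Chars.isalpha w[j] then j else pvNextAlpha w (j + 1)
  else j
termination_by w.length - j

-- cited by pvLoopA's decreasing_by
theorem pvNextAlpha_ge (w : List Char) (j : Nat) : j ≤ pvNextAlpha w j := by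
  rw [pvNextAlpha]
  split_ifs with h h2
  · exact le_refl j
  · have := pvNextAlpha_ge w (j + 1); omega
  · exact le_refl j
termination_by w.length - j
decreasing_by omega

-- A's outer while loop, returning the characters appended to `formatted` from index i on
def pvLoopA (w : List Char) (i : Nat) : List Char :=
  if h : i < w.length then
    let char1 := w[i]
    if ¬ PySem.Chars.isalpha char1 then pvLoopA w (i + 1)
    else
      let j := pvNextAlpha w (i + 1)
      if hj : j < w.length then
        let char2 := w[j]
        if char1 == char2 then char1 :: 'X' :: pvLoopA w j
        else char1 :: char2 :: pvLoopA w (j + 1)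
      else [char1]
  else []
termination_by w.length - i
decreasing_by
  · omega
  · have := pvNextAlpha_ge w (i + 1); omega
  · have := pvNextAlpha_ge w (i + 1); omega

-- A's step 3: [formatted[i:i+2] for i in range(0, len(formatted), 2)]
def pvChunk (f : List Char) : List String :=
  (PySem.List.pyRange 0 (PySem.List.len f) 2).map
    (fun i => String.ofList (PySem.List.slice f (some i) (some (i + 2))))

def format_word_to_digrams (word : String) : List String :=
  let w := (PySem.Str.replace (PySem.Str.upper word) "J" "I").toList
  let formatted := pvLoopA w 0
  let formatted :=
    if PySem.Int.mod (PySem.List.len formatted) 2 ≠ 0 then formatted ++ ['X'] else formatted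
  pvChunk formatted

-- ===== PORT B =====

-- B's pairing loop over the cleaned list: emit one digram, advance by 1 (pad/double) or 2
def pvLoopB : List Char → List String
  | [] => []
  | [a] => [String.ofList [a, 'X']]
  | a :: b :: rest =>
    if b == a then String.ofList [a, 'X'] :: pvLoopB (b :: rest)
    else String.ofList [a, b] :: pvLoopB rest

def format_word_to_digrams_alt (word : String) : List String :=
  let clean := ((PySem.Str.replace (PySem.Str.upper word) "J" "I").toList).filter PySem.Chars.isalpha
  pvLoopB clean

-- ===== PRECONDITION & SPEC =====
def Spec_format_word_to_digrams (word : String) (out : List String) : Prop := out = format_word_to_digrams_alt word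
instance (word : String) (out : List String) : Decidable (Spec_format_word_to_digrams word out) := by unfold Spec_format_word_to_digrams; infer_instance

-- ===== CLAIM (what is proved, stated in full; the proofs are below) =====
def Claim_equal_format_word_to_digrams : Prop := ∀ (word : String), Dom_format_word_to_digrams word → Spec_format_word_to_digrams word (format_word_to_digrams word)

-- ===== LEMMAS AND PROOFS =====

-- A's pad + chunk pipeline as one function of the formatted characters
def pvChunkPad (f : List Char) : List String :=
  pvChunk (if PySem.Int.mod (PySem.List.len f) 2 ≠ 0 then f ++ ['X'] else f)

theorem pvNextAlpha_filter (w : List Char) (j : Nat) :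
    (w.drop j).filter PySem.Chars.isalpha =
      (w.drop (pvNextAlpha w j)).filter PySem.Chars.isalpha := by
  rw [pvNextAlpha]
  split_ifs with h h2
  · rfl
  · rw [List.drop_eq_getElem_cons h, List.filter_cons, if_neg (by simp [h2])]
    exact pvNextAlpha_filter w (j + 1)
  · rfl
termination_by w.length - j
decreasing_by omega

theorem pvNextAlpha_alpha (w : List Char) (j : Nat) (h : pvNextAlpha w j < w.length) :
    PySem.Chars.isalpha w[pvNextAlpha w j] = true := by
  by_cases h1 : j < w.length
  · by_cases h2 : PySem.Chars.isalpha w[j]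
    · have e : pvNextAlpha w j = j := by rw [pvNextAlpha]; simp [h1, h2]
      simp only [e]; exact h2
    · have e : pvNextAlpha w j = pvNextAlpha w (j + 1) := by rw [pvNextAlpha]; simp [h1, h2]
      simp only [e] at h ⊢; exact pvNextAlpha_alpha w (j + 1) h
  · have e : pvNextAlpha w j = j := by rw [pvNextAlpha]; simp [h1]
    simp only [e] at h; omega
termination_by w.length - j
decreasing_by omega

theorem pvChunk_nil : pvChunk [] = [] := by decide

theorem pvChunk_cons2 (a b : Char) (s : List Char) :
    pvChunk (a :: b :: s) = String.ofList [a, b] :: pvChunk s := by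
  unfold pvChunk
  rw [PySem.List.pyRange_of_pos 0 (PySem.List.len (a :: b :: s)) (by norm_num),
      PySem.List.pyRange_of_pos 0 (PySem.List.len s) (by norm_num)]
  simp only [PySem.List.len_eq, List.length_cons]
  have hc : (if (0:Int) < ((s.length + 1 + 1 : Nat) : Int) then (((((s.length + 1 + 1 : Nat):Int) - 0 + 2 - 1) / 2).toNat) else 0)
      = (if (0:Int) < ((s.length : Nat) : Int) then ((((s.length : Nat):Int) - 0 + 2 - 1) / 2).toNat else 0) + 1 := by
    split_ifs with p q <;> omega
  rw [hc, List.range_succ_eq_map]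
  simp only [List.map_cons, List.map_map]
  congr 1
  refine List.map_congr_left ?_
  intro k _
  simp only [Function.comp_apply, Nat.succ_eq_add_one]
  have e1 : (0 + 2 * (((k:Nat) + 1 : Nat) : Int) : Int) = ((2*k+2 : Nat) : Int) := by push_cast; ring
  have e2 : (0 + 2 * (((k:Nat) + 1 : Nat) : Int) + 2 : Int) = ((2*k+2 : Nat) : Int) + ((2:Nat):Int) := by
    push_cast; ring
  have e3 : (0 + 2 * ((k:Nat) : Int) : Int) = ((2*k : Nat) : Int) := by push_cast; ring
  have e4 : (0 + 2 * ((k:Nat) : Int) + 2 : Int) = ((2*k : Nat) : Int) + ((2:Nat):Int) := by push_cast; ring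
  rw [e2, e1, e4, e3, PySem.List.slice_natCast_add, PySem.List.slice_natCast_add]
  have hd : (a :: b :: s).drop (2*k+2) = s.drop (2*k) := by
    have : 2*k+2 = (2*k)+1+1 := by ring
    rw [this, List.drop_succ_cons, List.drop_succ_cons]
  rw [hd]

theorem pvMod2 (n : Nat) : PySem.Int.mod ((n : Int)) 2 ≠ 0 ↔ n % 2 = 1 := by
  simp [PySem.Int.mod, Int.fmod_eq_emod]
  omega

theorem pvChunkPad_nil : pvChunkPad [] = [] := by decide

theorem pvChunkPad_one (c : Char) : pvChunkPad [c] = [String.ofList [c, 'X']] := by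
  unfold pvChunkPad
  rw [if_pos (by simp [PySem.List.len_eq])]
  show pvChunk [c, 'X'] = _
  rw [pvChunk_cons2, pvChunk_nil]

theorem pvChunkPad_cons2 (a b : Char) (s : List Char) :
    pvChunkPad (a :: b :: s) = String.ofList [a, b] :: pvChunkPad s := by
  unfold pvChunkPad
  simp only [PySem.List.len_eq, List.length_cons]
  by_cases hp : s.length % 2 = 1
  · rw [if_pos (by rw [pvMod2]; omega), if_pos (by rw [pvMod2]; omega)]
    show pvChunk (a :: b :: (s ++ ['X'])) = _
    rw [pvChunk_cons2]
  · rw [if_neg (by rw [pvMod2]; omega), if_neg (by rw [pvMod2]; omega)]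
    rw [pvChunk_cons2]

-- the crux: A's skip/scan loop, padded and chunked, equals B's pairing loop on the filtered list
theorem pvMainAux (w : List Char) (n : Nat) : ∀ i, w.length - i ≤ n →
    pvChunkPad (pvLoopA w i) = pvLoopB ((w.drop i).filter PySem.Chars.isalpha) := by
  induction n with
  | zero =>
    intro i hi
    have h1 : ¬ i < w.length := by omega
    have hd : w.drop i = [] := List.drop_eq_nil_of_le (by omega)
    rw [pvLoopA, dif_neg h1, hd]
    simp [pvLoopB, pvChunkPad_nil]
  | succ n ih =>
    intro i hi
    by_cases h : i < w.length
    · have hcons : w.drop i = w[i] :: w.drop (i + 1) := List.drop_eq_getElem_cons h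
      by_cases ha : PySem.Chars.isalpha w[i]
      · have hfi : (w.drop i).filter PySem.Chars.isalpha
            = w[i] :: (w.drop (i + 1)).filter PySem.Chars.isalpha := by
          rw [hcons, List.filter_cons, if_pos (by simp [ha])]
        have hfj := pvNextAlpha_filter w (i + 1)
        have hge := pvNextAlpha_ge w (i + 1)
        by_cases hj : pvNextAlpha w (i + 1) < w.length
        · have ha2 := pvNextAlpha_alpha w (i + 1) hj
          have hfj2 : (w.drop (pvNextAlpha w (i + 1))).filter PySem.Chars.isalpha
              = w[pvNextAlpha w (i + 1)] :: (w.drop (pvNextAlpha w (i + 1) + 1)).filter PySem.Chars.isalpha := by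
            rw [List.drop_eq_getElem_cons hj, List.filter_cons, if_pos (by simp [ha2])]
          rw [pvLoopA, dif_pos h]
          simp only [ha, not_true_eq_false, if_false, dif_pos hj]
          by_cases he : w[i] = w[pvNextAlpha w (i + 1)]
          · rw [if_pos (by simp [he]), pvChunkPad_cons2]
            rw [hfi, hfj, hfj2, pvLoopB, if_pos (by simp [he])]
            have := ih (pvNextAlpha w (i + 1)) (by omega)
            rw [this, hfj2]
          · rw [if_neg (by simp [he]), pvChunkPad_cons2]
            rw [hfi, hfj, hfj2, pvLoopB, if_neg (by simp; exact fun hh => he hh.symm)]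
            have := ih (pvNextAlpha w (i + 1) + 1) (by omega)
            rw [this]
        · have hd2 : w.drop (pvNextAlpha w (i + 1)) = [] := List.drop_eq_nil_of_le (by omega)
          rw [pvLoopA, dif_pos h]
          simp only [ha, not_true_eq_false, if_false, dif_neg hj]
          rw [pvChunkPad_one, hfi, hfj, hd2]
          simp [pvLoopB]
      · rw [pvLoopA, dif_pos h]
        simp only [ha]
        have hne : ¬ (PySem.Chars.isalpha w[i] = true) := ha
        rw [hcons, List.filter_cons, if_neg hne]
        exact ih (i + 1) (by omega)
    · have hd : w.drop i = [] := List.drop_eq_nil_of_le (by omega)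
      rw [pvLoopA, dif_neg h, hd]
      simp [pvLoopB, pvChunkPad_nil]

-- ===== VERDICT (by name: the statement is the Claim_ definition above) =====
theorem format_word_to_digrams_spec : Claim_equal_format_word_to_digrams := by
  intro word _
  unfold Spec_format_word_to_digrams format_word_to_digrams format_word_to_digrams_alt
  have := pvMainAux ((PySem.Str.replace (PySem.Str.upper word) "J" "I").toList)
    ((PySem.Str.replace (PySem.Str.upper word) "J" "I").toList).length 0 (by omega)
  simpa [pvChunkPad] using this
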